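-- pv_equiv track=rewrite | github.com/SoyDuilio/admision | app/services/validacion.py | validar_respuestas
-- ===== SOURCE A (Python) =====
-- from typing import Dict, Tuple
--
-- def validar_respuestas(respuestas: list) -> Tuple[bool, Dict]:
--     """
--     Valida que las respuestas sean correctas.
--
--     Returns:
--         tuple: (son_validas, estadisticas)
--     """
--     if len(respuestas) != 100:
--         return False, {
--             "error": f"Se esperaban 100 respuestas, se recibieron {len(respuestas)}"
--         }
--
--     stats = {
--         "total": 100,
--         "respondidas": 0,
--         "en_blanco": 0,
--         "validas": 0,
--         "invalidas": 0
--     }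
--
--     validas = ["A", "B", "C", "D", "E", None]
--
--     for resp in respuestas:
--         if resp is None:
--             stats["en_blanco"] += 1
--         else:
--             stats["respondidas"] += 1
--             if resp.upper() in ["A", "B", "C", "D", "E"]:
--                 stats["validas"] += 1
--             else:
--                 stats["invalidas"] += 1
--
--     return True, stats
-- ===== SOURCE B (Python) =====
-- def _cuenta(xs):
--     """Divide-and-conquer: returns (en_blanco, validas, invalidas) for xs."""
--     if not xs:
--         return (0, 0, 0)
--     if len(xs) == 1:
--         r = xs[0]
--         if r is None:
--             return (1, 0, 0)
--         if r.upper() in ("A", "B", "C", "D", "E"):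
--             return (0, 1, 0)
--         return (0, 0, 1)
--     mid = len(xs) // 2
--     b1, v1, i1 = _cuenta(xs[:mid])
--     b2, v2, i2 = _cuenta(xs[mid:])
--     return (b1 + b2, v1 + v2, i1 + i2)
--
--
-- def validar_respuestas(respuestas: list):
--     """Counts by recursive halving and merging of sub-counts; respondidas derived as validas+invalidas."""
--     if len(respuestas) != 100:
--         return False, {
--             "error": f"Se esperaban 100 respuestas, se recibieron {len(respuestas)}"
--         }
--     en_blanco, validas, invalidas = _cuenta(respuestas)
--     return True, {
--         "total": 100,
--         "respondidas": validas + invalidas,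
--         "en_blanco": en_blanco,
--         "validas": validas,
--         "invalidas": invalidas,
--     }
-- ===== Notes on version B (the rewrite author's own statement) =====
-- stated objective: alternative
-- what changed: Replaces A's single stateful four-counter loop with a divide-and-conquer recursion that computes (en_blanco, validas, invalidas) triples on halves and merges them, deriving respondidas as validas+invalidas.
import Mathlib
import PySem

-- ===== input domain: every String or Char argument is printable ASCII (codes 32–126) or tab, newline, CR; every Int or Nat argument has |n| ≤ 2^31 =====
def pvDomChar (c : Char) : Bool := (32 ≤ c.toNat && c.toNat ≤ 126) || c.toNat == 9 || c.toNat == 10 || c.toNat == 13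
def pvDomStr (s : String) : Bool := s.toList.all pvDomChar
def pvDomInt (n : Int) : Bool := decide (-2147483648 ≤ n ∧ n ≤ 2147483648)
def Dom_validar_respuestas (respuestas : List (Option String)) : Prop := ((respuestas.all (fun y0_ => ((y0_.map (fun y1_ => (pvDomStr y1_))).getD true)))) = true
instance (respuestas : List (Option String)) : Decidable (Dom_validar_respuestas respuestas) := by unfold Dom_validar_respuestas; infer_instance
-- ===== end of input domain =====

-- B replaces A's single four-counter loop with a divide-and-conquer recursion merging sub-counts (objective: alternative).
-- ===== PORT A =====
-- one loop updating four dict counters; state = (en_blanco, respondidas, validas, invalidas)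
def vLoopA (respuestas : List (Option String)) : Int × Int × Int × Int :=
  respuestas.foldl
    (fun (s : Int × Int × Int × Int) resp =>
      match resp with
      | none => (s.1 + 1, s.2.1, s.2.2.1, s.2.2.2)
      | some r =>
        if ["A", "B", "C", "D", "E"].contains (PySem.Str.upper r) then
          (s.1, s.2.1 + 1, s.2.2.1 + 1, s.2.2.2)
        else
          (s.1, s.2.1 + 1, s.2.2.1, s.2.2.2 + 1))
    (0, 0, 0, 0)

def validar_respuestas (respuestas : List (Option String)) : Bool × (List (String × String)) :=
  if respuestas.length ≠ 100 then
    (false, [("error", "Se esperaban 100 respuestas, se recibieron " ++ PySem.Int.toStr respuestas.length)])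
  else
    let s := vLoopA respuestas
    (true, [("total", "100"),
            ("respondidas", PySem.Int.toStr s.2.1),
            ("en_blanco", PySem.Int.toStr s.1),
            ("validas", PySem.Int.toStr s.2.2.1),
            ("invalidas", PySem.Int.toStr s.2.2.2)])

-- ===== PORT B =====
-- divide and conquer over halves; xs[:mid] = take mid, xs[mid:] = drop mid (mid ≥ 0)
def vCuenta (xs : List (Option String)) : Int × Int × Int :=
  if xs.length = 0 then (0, 0, 0)
  else if xs.length = 1 then
    match xs.head? with
    | none => (0, 0, 0)  -- unreachable (length = 1)
    | some none => (1, 0, 0)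
    | some (some r) =>
      if ["A", "B", "C", "D", "E"].contains (PySem.Str.upper r) then (0, 1, 0) else (0, 0, 1)
  else
    let mid := xs.length / 2
    let l := vCuenta (xs.take mid)
    let r := vCuenta (xs.drop mid)
    (l.1 + r.1, l.2.1 + r.2.1, l.2.2 + r.2.2)
termination_by xs.length
decreasing_by
  · simp only [List.length_take]; omega
  · simp only [List.length_drop]; omega

def validar_respuestas_alt (respuestas : List (Option String)) : Bool × (List (String × String)) :=
  if respuestas.length ≠ 100 then
    (false, [("error", "Se esperaban 100 respuestas, se recibieron " ++ PySem.Int.toStr respuestas.length)])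
  else
    let c := vCuenta respuestas
    (true, [("total", "100"),
            ("respondidas", PySem.Int.toStr (c.2.1 + c.2.2)),
            ("en_blanco", PySem.Int.toStr c.1),
            ("validas", PySem.Int.toStr c.2.1),
            ("invalidas", PySem.Int.toStr c.2.2)])

-- ===== PRECONDITION & SPEC =====
def Spec_validar_respuestas (respuestas : List (Option String)) (out : Bool × (List (String × String))) : Prop := out = validar_respuestas_alt respuestas
instance (respuestas : List (Option String)) (out : Bool × (List (String × String))) : Decidable (Spec_validar_respuestas respuestas out) := by unfold Spec_validar_respuestas; infer_instance

-- ===== CLAIM (what is proved, stated in full; the proofs are below) =====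
def Claim_equal_validar_respuestas : Prop := ∀ (respuestas : List (Option String)), Dom_validar_respuestas respuestas → Spec_validar_respuestas respuestas (validar_respuestas respuestas)

-- ===== LEMMAS AND PROOFS =====
def vEsValida (r : Option String) : Bool :=
  match r with
  | none => false
  | some x => ["A", "B", "C", "D", "E"].contains (PySem.Str.upper x)

lemma vCuenta_eq (xs : List (Option String)) :
    vCuenta xs = ((xs.count none : Int),
                  (xs.countP vEsValida : Int),
                  (xs.countP (fun x => x.isSome && !vEsValida x) : Int)) := by
  fun_induction vCuenta xs with
  | case1 xs h => simp [List.length_eq_zero_iff.mp h]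
  | case2 xs h h1 hh =>
    obtain ⟨x, hx⟩ := List.length_eq_one_iff.mp h1
    subst hx; simp at hh
  | case3 xs h h1 hh =>
    obtain ⟨x, hx⟩ := List.length_eq_one_iff.mp h1
    subst hx; simp at hh; subst hh
    simp [vEsValida]
  | case4 xs h h1 r hh hc =>
    obtain ⟨x, hx⟩ := List.length_eq_one_iff.mp h1
    subst hx; simp at hh; subst hh
    have hv : vEsValida (some r) = true := hc
    simp [hv]
  | case5 xs h h1 r hh hc =>
    obtain ⟨x, hx⟩ := List.length_eq_one_iff.mp h1
    subst hx; simp at hh; subst hh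
    have hv : vEsValida (some r) = false := Bool.eq_false_iff.mpr hc
    simp [hv]
  | case6 xs h h1 mid l r ihl ihr =>
    simp only [l, r, ihl, ihr, Prod.mk.injEq]
    have hc1 : (List.take mid xs).count none + (List.drop mid xs).count none = xs.count none := by
      rw [← List.count_append, List.take_append_drop]
    have hc2 : (List.take mid xs).countP vEsValida + (List.drop mid xs).countP vEsValida
        = xs.countP vEsValida := by
      rw [← List.countP_append, List.take_append_drop]
    have hc3 : (List.take mid xs).countP (fun x => x.isSome && !vEsValida x)
          + (List.drop mid xs).countP (fun x => x.isSome && !vEsValida x)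
        = xs.countP (fun x => x.isSome && !vEsValida x) := by
      rw [← List.countP_append, List.take_append_drop]
    refine ⟨?_, ?_, ?_⟩
    · rw [← hc1]; push_cast; ring
    · rw [← hc2]; push_cast; ring
    · rw [← hc3]; push_cast; ring

lemma vLoopA_go (respuestas : List (Option String)) (b r v i : Int) :
    respuestas.foldl
      (fun (s : Int × Int × Int × Int) resp =>
        match resp with
        | none => (s.1 + 1, s.2.1, s.2.2.1, s.2.2.2)
        | some x =>
          if ["A", "B", "C", "D", "E"].contains (PySem.Str.upper x) then
            (s.1, s.2.1 + 1, s.2.2.1 + 1, s.2.2.2)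
          else
            (s.1, s.2.1 + 1, s.2.2.1, s.2.2.2 + 1))
      (b, r, v, i)
    = (b + respuestas.count none,
       r + respuestas.countP (fun x => x.isSome),
       v + respuestas.countP vEsValida,
       i + respuestas.countP (fun x => x.isSome && !vEsValida x)) := by
  induction respuestas generalizing b r v i with
  | nil => simp
  | cons hd tl ih =>
    cases hd with
    | none =>
      simp only [List.foldl_cons, ih, List.count_cons, List.countP_cons,
        Option.isSome_none, Bool.false_and, beq_self_eq_true, if_true,
        Prod.mk.injEq]
      have hvn : vEsValida none = false := rfl
      simp only [hvn]
      push_cast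
      refine ⟨by ring, by simp, by simp, by simp⟩
    | some x =>
      have hv : vEsValida (some x) = ["A", "B", "C", "D", "E"].contains (PySem.Str.upper x) := rfl
      by_cases hx : ["A", "B", "C", "D", "E"].contains (PySem.Str.upper x)
      · simp only [List.foldl_cons, hx, if_true, ih, List.count_cons, List.countP_cons,
          hv, Option.isSome_some, Bool.true_and, Prod.mk.injEq]
        simp only [Bool.not_true]
        push_cast
        refine ⟨by simp, by ring, by ring, by simp⟩
      · simp only [List.foldl_cons, ih, List.count_cons, List.countP_cons,
          hv, Option.isSome_some, Bool.true_and, Prod.mk.injEq]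
        rw [if_neg hx]
        simp only [hx, Bool.not_false]
        push_cast
        refine ⟨by simp, by ring, by simp, by ring⟩

lemma vValid_split (respuestas : List (Option String)) :
    respuestas.countP (fun x => x.isSome) =
      respuestas.countP vEsValida + respuestas.countP (fun x => x.isSome && !vEsValida x) := by
  induction respuestas with
  | nil => simp
  | cons hd tl ih =>
    cases hd with
    | none => simp [show vEsValida none = false from rfl, ih]
    | some x =>
      cases hvx : vEsValida (some x) <;> simp [hvx, ih] <;> omega

-- ===== VERDICT (by name: the statement is the Claim_ definition above) =====
theorem validar_respuestas_spec : Claim_equal_validar_respuestas := by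
  intro respuestas _
  unfold Spec_validar_respuestas validar_respuestas validar_respuestas_alt
  by_cases h : respuestas.length = 100
  · simp only [h, ne_eq, not_true_eq_false, if_false]
    unfold vLoopA
    rw [vLoopA_go, vCuenta_eq]
    have hv := vValid_split respuestas
    have : (0 : Int) + (respuestas.countP (fun x => x.isSome) : Int)
        = (respuestas.countP vEsValida : Int)
          + (respuestas.countP (fun x => x.isSome && !vEsValida x) : Int) := by
      push_cast [hv]; ring
    simp [this]
  · simp [h]
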